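-- pv_equiv track=rewrite | github.com/ADRIANDLT/Othello-IE-Proyect | othello_game.py | ai_has_new_disk_in_corner
-- ===== SOURCE A (Python) =====
-- def ai_has_new_disk_in_corner(original_board, after_move_board):
--     new_ai_disks = []
--     for i in range(len(original_board)):
--         for j in range(len(original_board[i])):
--             if original_board[i][j] != 2 and after_move_board[i][j] == 2:
--                 new_ai_disks.append((i, j))
--
--     corners = [(0, 0), (0, len(original_board[0])-1), (len(original_board)-1, 0), (len(original_board)-1, len(original_board[0])-1)]
--     for disk in new_ai_disks:
--         if disk in corners:
--             return True
--     return False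
-- ===== SOURCE B (Python) =====
-- def ai_has_new_disk_in_corner(original_board, after_move_board):
--     n = len(original_board)
--     m = len(original_board[0])
--     return any(original_board[i][j] != 2 and after_move_board[i][j] == 2
--                for i, j in ((0, 0), (0, m - 1), (n - 1, 0), (n - 1, m - 1)))
-- ===== Notes on version B (the rewrite author's own statement) =====
-- stated objective: faster
-- what changed: Instead of scanning the whole board to collect every changed-to-AI cell and testing each against the corner list, B inspects only the 4 corner cells directly; Pre_ restricts to nonempty same-shape rectangular boards (the game's actual boards) because on ragged or empty-row boards A's corner coordinates computed from row 0 are accidental and the direct corner lookup raises IndexError.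
-- outside the precondition, e.g. on ai_has_new_disk_in_corner([[2, 2], [2]], [[2, 2], [2, 2]]): A returns False, B raises IndexError; on ai_has_new_disk_in_corner([[]], [[]]): A returns False, B raises IndexError
import Mathlib
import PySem

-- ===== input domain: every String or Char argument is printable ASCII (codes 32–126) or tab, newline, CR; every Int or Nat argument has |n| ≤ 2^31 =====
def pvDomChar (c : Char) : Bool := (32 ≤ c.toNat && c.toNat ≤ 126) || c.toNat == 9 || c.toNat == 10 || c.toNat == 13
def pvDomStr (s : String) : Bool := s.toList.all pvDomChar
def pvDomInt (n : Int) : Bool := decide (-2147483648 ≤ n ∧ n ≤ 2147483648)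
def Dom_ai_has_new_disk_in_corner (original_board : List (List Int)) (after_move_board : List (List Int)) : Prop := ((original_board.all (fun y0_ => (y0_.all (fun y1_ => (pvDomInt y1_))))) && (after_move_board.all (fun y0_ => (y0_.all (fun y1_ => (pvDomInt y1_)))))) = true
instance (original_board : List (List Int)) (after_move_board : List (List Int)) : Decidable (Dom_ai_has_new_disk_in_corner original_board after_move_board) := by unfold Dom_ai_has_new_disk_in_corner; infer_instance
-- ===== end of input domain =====

-- B checks only the 4 corner cells directly instead of scanning the whole board: O(1) vs O(n*m).


-- ===== PORT A =====
def ai_has_new_disk_in_corner (original_board : List (List Int)) (after_move_board : List (List Int)) : Bool :=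
  let new_ai_disks : List (Int × Int) :=
    (PySem.List.pyRange 0 original_board.length 1).foldl (fun acc i =>
      (PySem.List.pyRange 0 (PySem.List.pyGetD original_board i []).length 1).foldl (fun acc2 j =>
        if (PySem.List.pyGetD (PySem.List.pyGetD original_board i []) j 0 != 2) &&
           (PySem.List.pyGetD (PySem.List.pyGetD after_move_board i []) j 0 == 2)
        then acc2 ++ [(i, j)] else acc2) acc) []
  let corners : List (Int × Int) :=
    [(0, 0), (0, ((PySem.List.pyGetD original_board 0 []).length : Int) - 1),
     ((original_board.length : Int) - 1, 0),
     ((original_board.length : Int) - 1, ((PySem.List.pyGetD original_board 0 []).length : Int) - 1)]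
  new_ai_disks.any (fun disk => corners.contains disk)

-- ===== PORT B =====
-- helper for B: has cell (i, j) just been changed to an AI disk?
def pvChangedToAI (original_board : List (List Int)) (after_move_board : List (List Int)) (i j : Int) : Bool :=
  (PySem.List.pyGetD (PySem.List.pyGetD original_board i []) j 0 != 2) &&
  (PySem.List.pyGetD (PySem.List.pyGetD after_move_board i []) j 0 == 2)

def ai_has_new_disk_in_corner_alt (original_board : List (List Int)) (after_move_board : List (List Int)) : Bool :=
  let n : Int := original_board.length
  let m : Int := ((PySem.List.pyGetD original_board 0 []).length : Int)
  [(0, 0), (0, m - 1), (n - 1, 0), (n - 1, m - 1)].any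
    (fun c => pvChangedToAI original_board after_move_board c.1 c.2)

-- ===== PRECONDITION & SPEC =====
-- Pre_ restricts to nonempty same-shape rectangular boards with at least one column — the game's
-- actual boards. It excludes the empty board and shape mismatches on which A raises IndexError,
-- and also ragged / empty-row boards on which A still returns a value: there A's corner
-- coordinates computed from row 0 are accidental and B's direct corner lookup raises IndexError.
def Pre_ai_has_new_disk_in_corner (original_board : List (List Int)) (after_move_board : List (List Int)) : Prop :=
  original_board ≠ [] ∧
  0 < (original_board.headD []).length ∧
  after_move_board.length = original_board.length ∧
  (∀ r ∈ original_board, r.length = (original_board.headD []).length) ∧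
  (∀ r ∈ after_move_board, r.length = (original_board.headD []).length)
instance (original_board : List (List Int)) (after_move_board : List (List Int)) : Decidable (Pre_ai_has_new_disk_in_corner original_board after_move_board) := by unfold Pre_ai_has_new_disk_in_corner; infer_instance
def pvWitness_ai_has_new_disk_in_corner : List (List Int) × List (List Int) := ([[0, 1], [2, 0]], [[2, 1], [2, 2]])

def Spec_ai_has_new_disk_in_corner (original_board : List (List Int)) (after_move_board : List (List Int)) (out : Bool) : Prop := out = ai_has_new_disk_in_corner_alt original_board after_move_board
instance (original_board : List (List Int)) (after_move_board : List (List Int)) (out : Bool) : Decidable (Spec_ai_has_new_disk_in_corner original_board after_move_board out) := by unfold Spec_ai_has_new_disk_in_corner; infer_instance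

-- ===== CLAIM (what is proved, stated in full; the proofs are below) =====
def Claim_equal_ai_has_new_disk_in_corner : Prop := ∀ (original_board : List (List Int)) (after_move_board : List (List Int)), Dom_ai_has_new_disk_in_corner original_board after_move_board → Pre_ai_has_new_disk_in_corner original_board after_move_board → Spec_ai_has_new_disk_in_corner original_board after_move_board (ai_has_new_disk_in_corner original_board after_move_board)

-- ===== LEMMAS AND PROOFS =====

lemma pv_ports_agree (o a : List (List Int)) (hpre : Pre_ai_has_new_disk_in_corner o a) :
    ai_has_new_disk_in_corner o a = ai_has_new_disk_in_corner_alt o a := by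
  obtain ⟨ho, hm, _, hrows, _⟩ := hpre
  have hn : (0:Int) < ↑o.length := by
    cases o with
    | nil => exact absurd rfl ho
    | cons r0 rest => simp
  have hrow : ∀ i : Int, 0 ≤ i → i < (o.length : Int) →
      (PySem.List.pyGetD o i []).length = (o.headD []).length := by
    intro i h0 hl
    refine hrows _ (PySem.List.pyGetD_mem _ _ ?_)
    simp only [PySem.Raise.InRange]
    omega
  have h0row : (PySem.List.pyGetD o 0 []).length = (o.headD []).length :=
    hrow 0 le_rfl hn
  simp only [ai_has_new_disk_in_corner, ai_has_new_disk_in_corner_alt, pvChangedToAI,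
    PySem.List.foldl_append_if, PySem.List.foldl_append_eq_flatMap, List.nil_append]
  rw [Bool.eq_iff_iff]
  simp only [List.any_eq_true, List.mem_flatMap, List.mem_map, List.mem_filter,
    PySem.List.mem_pyRange_one, List.contains_eq_mem, List.mem_cons, List.not_mem_nil, or_false,
    Bool.and_eq_true, decide_eq_true_eq]
  constructor
  · rintro ⟨d, ⟨i, ⟨hi0, hin⟩, j, ⟨⟨hj0, hjlen⟩, hP1, hP2⟩, rfl⟩, hc⟩
    rcases hc with h | h | h | h <;> rw [Prod.mk.injEq] at h <;>
      obtain ⟨rfl, rfl⟩ := h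
    · exact ⟨(0, 0), Or.inl rfl, hP1, hP2⟩
    · exact ⟨_, Or.inr (Or.inl rfl), hP1, hP2⟩
    · exact ⟨_, Or.inr (Or.inr (Or.inl rfl)), hP1, hP2⟩
    · exact ⟨_, Or.inr (Or.inr (Or.inr rfl)), hP1, hP2⟩
  · have hm0 : (0:Int) < ((PySem.List.pyGetD o 0 []).length : Int) := by
      rw [h0row]; exact_mod_cast hm
    have hlast : ((PySem.List.pyGetD o ((o.length:Int)-1) []).length : Int)
        = ((PySem.List.pyGetD o 0 []).length : Int) := by
      rw [hrow _ (by omega) (by omega), h0row]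
    rintro ⟨c, hc, hP1, hP2⟩
    rcases hc with h | h | h | h <;> subst h
    · exact ⟨(0, 0), ⟨0, ⟨le_rfl, hn⟩, 0, ⟨⟨le_rfl, by rw [h0row]; exact_mod_cast hm⟩, hP1, hP2⟩, rfl⟩,
        Or.inl rfl⟩
    · refine ⟨_, ⟨0, ⟨le_rfl, hn⟩, ((PySem.List.pyGetD o 0 []).length : Int) - 1,
        ⟨⟨by omega, by omega⟩, hP1, hP2⟩, rfl⟩,
        Or.inr (Or.inl rfl)⟩
    · refine ⟨_, ⟨(o.length : Int) - 1, ⟨by omega, by omega⟩, 0,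
        ⟨⟨le_rfl, ?_⟩, hP1, hP2⟩, rfl⟩, Or.inr (Or.inr (Or.inl rfl))⟩
      omega
    · refine ⟨_, ⟨(o.length : Int) - 1, ⟨by omega, by omega⟩,
        ((PySem.List.pyGetD o 0 []).length : Int) - 1,
        ⟨⟨by omega, by omega⟩, hP1, hP2⟩, rfl⟩, Or.inr (Or.inr (Or.inr rfl))⟩

-- ===== VERDICT (by name: the statement is the Claim_ definition above) =====
theorem ai_has_new_disk_in_corner_spec : Claim_equal_ai_has_new_disk_in_corner := by
  intro o a _ hpre
  unfold Spec_ai_has_new_disk_in_corner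
  exact pv_ports_agree o a hpre
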